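-- pv_equiv track=rewrite | github.com/kimcanal/yacht-multi-with-suggestions | yacht_engine.py | _calc_score_internal
-- ===== SOURCE A (Python) =====
-- from collections import Counter
--
-- CATS = {
--     'Ones': 0, 'Twos': 1, 'Threes': 2, 'Fours': 3, 'Fives': 4, 'Sixes': 5,
--     'Choice': 6, '4 of a Kind': 7, 'Full House': 8, 'Single Straight': 9, 'Large Straight': 10, 'Yacht': 11
-- }
--
-- def _calc_score_internal(dice, category_idx):
--     counts = Counter(dice)
--
--     if 0 <= category_idx <= 5: # 1~6
--         return counts[category_idx + 1] * (category_idx + 1)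
--
--     if category_idx == CATS['Choice']:
--         return sum(dice)
--
--     if category_idx == CATS['4 of a Kind']:
--         # 4개 이상 동일하면 5개 전체 합산
--         most_common = counts.most_common(1)[0]
--         if most_common[1] >= 4:
--             return sum(dice)
--         return 0
--
--     if category_idx == CATS['Full House']:
--         # 5개 전체 합산 (3+2 조합일 때만)
--         if len(counts) == 2 and 3 in counts.values() and 2 in counts.values():
--             return sum(dice)
--         # 5 of a kind도 Full House로 인정
--         if len(counts) == 1 and len(dice) == 5:
--             return sum(dice)
--         return 0
--
--     if category_idx == CATS['Single Straight']:
--         # 연속 4개: 1-2-3-4, 2-3-4-5, 3-4-5-6 중 하나, 15점 고정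
--         s_dice = set(dice)
--         straights = [{1,2,3,4}, {2,3,4,5}, {3,4,5,6}]
--         if any(s.issubset(s_dice) for s in straights):
--             return 15
--         return 0
--
--     if category_idx == CATS['Large Straight']:
--         # 연속 5개: 1-2-3-4-5 또는 2-3-4-5-6, 30점 고정
--         s_dice = set(dice)
--         if {1,2,3,4,5}.issubset(s_dice) or {2,3,4,5,6}.issubset(s_dice):
--             return 30
--         return 0
--
--     if category_idx == CATS['Yacht']:
--         if len(counts) == 1: return 50
--         return 0
--
--     return 0
-- ===== SOURCE B (Python) =====
-- CATS = {
--     'Ones': 0, 'Twos': 1, 'Threes': 2, 'Fours': 3, 'Fives': 4, 'Sixes': 5,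
--     'Choice': 6, '4 of a Kind': 7, 'Full House': 8, 'Single Straight': 9, 'Large Straight': 10, 'Yacht': 11
-- }
--
-- def _calc_score_internal(dice, category_idx):
--     if 0 <= category_idx <= 5:
--         face = category_idx + 1
--         return dice.count(face) * face
--     if category_idx == CATS['Choice']:
--         return sum(dice)
--     s = sorted(dice)
--     if category_idx == CATS['4 of a Kind']:
--         # sorted window trick: four equal dice exist iff some s[i] == s[i+3]
--         return sum(dice) if any(a == b for a, b in zip(s, s[3:])) else 0
--     if category_idx == CATS['Full House']:
--         if len(s) == 5:
--             a, b, c, d, e = s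
--             if a == b and d == e and (b == c or c == d):
--                 return sum(dice)
--         return 0
--     if category_idx == CATS['Single Straight'] or category_idx == CATS['Large Straight']:
--         mask = 0
--         for v in dice:
--             if 1 <= v <= 6:
--                 mask |= 1 << (v - 1)
--         if category_idx == CATS['Single Straight']:
--             return 15 if any((mask >> k) & 15 == 15 for k in range(3)) else 0
--         return 30 if (mask & 31 == 31) or ((mask >> 1) & 31 == 31) else 0
--     if category_idx == CATS['Yacht']:
--         return 50 if s and s[0] == s[-1] else 0
--     return 0
-- ===== Notes on version B (the rewrite author's own statement) =====
-- stated objective: alternative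
-- what changed: B drops the Counter entirely and judges each category off the sorted dice list: number categories via list.count, 4-of-a-kind via a sorted-window test (s[i]==s[i+3]), Full House via a sorted 5-tuple pattern test, the straights via a face-membership bitmask, and Yacht via first==last of the sorted list.
-- crash fix: On ([], 7) A raises IndexError (counts.most_common(1)[0] on an empty Counter) while B returns 0 (no window of four equal dice exists). — e.g. on _calc_score_internal([], 7): A raises IndexError, B returns 0
import Mathlib
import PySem

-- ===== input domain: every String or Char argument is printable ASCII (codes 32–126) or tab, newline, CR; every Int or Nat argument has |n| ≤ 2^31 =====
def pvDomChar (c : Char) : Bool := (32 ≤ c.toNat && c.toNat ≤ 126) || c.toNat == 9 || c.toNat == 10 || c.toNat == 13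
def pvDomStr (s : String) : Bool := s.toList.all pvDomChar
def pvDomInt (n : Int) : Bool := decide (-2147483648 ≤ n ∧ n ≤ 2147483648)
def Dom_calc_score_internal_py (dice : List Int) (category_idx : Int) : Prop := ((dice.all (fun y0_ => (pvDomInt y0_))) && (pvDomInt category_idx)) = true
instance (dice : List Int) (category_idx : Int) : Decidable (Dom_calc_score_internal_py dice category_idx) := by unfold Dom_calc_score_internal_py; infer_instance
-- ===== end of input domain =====

-- B rewrites the Counter-based scorer around the sorted dice list (window test for 4-of-a-kind,
-- pattern test for Full House, a membership bitmask for the straights); return-value equivalence only.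

-- ===== PORT A =====
def calc_score_internal_py (dice : List Int) (category_idx : Int) : Int :=
  let counts := PySem.Dict.counter dice
  if 0 ≤ category_idx ∧ category_idx ≤ 5 then
    counts.getD (category_idx + 1) 0 * (category_idx + 1)
  else if category_idx = 6 then
    dice.sum
  else if category_idx = 7 then
    -- counts.most_common(1)[0]: on empty dice Python raises IndexError (excluded by Pre_); none ↦ 0 here
    match (PySem.List.sorted counts.items (fun p => p.2) true).head? with
    | some mc => if 4 ≤ mc.2 then dice.sum else 0
    | none => 0
  else if category_idx = 8 then
    if counts.size = 2 ∧ (3 : Int) ∈ counts.values ∧ (2 : Int) ∈ counts.values then dice.sum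
    else if counts.size = 1 ∧ dice.length = 5 then dice.sum
    else 0
  else if category_idx = 9 then
    let s_dice := PySem.Set.ofList dice
    if [([1,2,3,4] : List Int), [2,3,4,5], [3,4,5,6]].any
        (fun st => PySem.Set.issubset (PySem.Set.ofList st) s_dice) then 15 else 0
  else if category_idx = 10 then
    let s_dice := PySem.Set.ofList dice
    if PySem.Set.issubset (PySem.Set.ofList ([1,2,3,4,5] : List Int)) s_dice
        ∨ PySem.Set.issubset (PySem.Set.ofList ([2,3,4,5,6] : List Int)) s_dice then 30 else 0
  else if category_idx = 11 then
    if counts.size = 1 then 50 else 0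
  else 0

-- ===== PORT B =====
def calc_score_internal_py_alt (dice : List Int) (category_idx : Int) : Int :=
  if 0 ≤ category_idx ∧ category_idx ≤ 5 then
    (dice.count (category_idx + 1) : Int) * (category_idx + 1)
  else if category_idx = 6 then
    dice.sum
  else
    let s := PySem.List.sorted dice (fun x => x) false
    if category_idx = 7 then
      if (s.zip (PySem.List.slice s (some 3) none)).any (fun p => p.1 == p.2) then dice.sum else 0
    else if category_idx = 8 then
      match s with
      | [a, b, c, d, e] => if a = b ∧ d = e ∧ (b = c ∨ c = d) then dice.sum else 0
      | _ => 0
    else if category_idx = 9 ∨ category_idx = 10 then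
      let mask : Int := dice.foldl
        (fun m v => if 1 ≤ v ∧ v ≤ 6 then PySem.Int.bor m ((1 : Int) <<< (Int.toNat (v - 1))) else m) 0
      if category_idx = 9 then
        if (PySem.List.pyRange 0 3 1).any (fun k => PySem.Int.band (mask >>> k.toNat) 15 == 15)
          then 15 else 0
      else
        if PySem.Int.band mask 31 = 31 ∨ PySem.Int.band (mask >>> 1) 31 = 31 then 30 else 0
    else if category_idx = 11 then
      match s.head?, s.getLast? with
      | some a, some b => if a = b then 50 else 0
      | _, _ => 0
    else 0

-- ===== PRECONDITION & SPEC =====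
-- Pre_ excludes only (dice = [], category_idx = 7), where A raises IndexError on counts.most_common(1)[0].
def Pre_calc_score_internal_py (dice : List Int) (category_idx : Int) : Prop :=
  ¬ (dice = [] ∧ category_idx = 7)
instance (dice : List Int) (category_idx : Int) : Decidable (Pre_calc_score_internal_py dice category_idx) := by unfold Pre_calc_score_internal_py; infer_instance
def pvWitness_calc_score_internal_py : List Int × Int := ([1, 1, 1, 2, 2], 8)

-- On empty dice with category 7, A raises IndexError (most_common(1)[0] of an empty Counter); B returns 0.
def Raises_calc_score_internal_py (dice : List Int) (category_idx : Int) : Prop :=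
  dice = [] ∧ category_idx = 7
instance (dice : List Int) (category_idx : Int) : Decidable (Raises_calc_score_internal_py dice category_idx) := by unfold Raises_calc_score_internal_py; infer_instance
def pvRaiseWitness_calc_score_internal_py : List Int × Int := ([], 7)
def pvRaiseWitnessOut_calc_score_internal_py : Int := 0

def Spec_calc_score_internal_py (dice : List Int) (category_idx : Int) (out : Int) : Prop := out = calc_score_internal_py_alt dice category_idx
instance (dice : List Int) (category_idx : Int) (out : Int) : Decidable (Spec_calc_score_internal_py dice category_idx out) := by unfold Spec_calc_score_internal_py; infer_instance

-- ===== CLAIM (what is proved, stated in full; the proofs are below) =====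
def Claim_equal_calc_score_internal_py : Prop := ∀ (dice : List Int) (category_idx : Int), Dom_calc_score_internal_py dice category_idx → Pre_calc_score_internal_py dice category_idx → Spec_calc_score_internal_py dice category_idx (calc_score_internal_py dice category_idx)
def Claim_raises_calc_score_internal_py : Prop := (∀ (dice : List Int) (category_idx : Int), Dom_calc_score_internal_py dice category_idx → Raises_calc_score_internal_py dice category_idx → ¬ Pre_calc_score_internal_py dice category_idx) ∧ (Dom_calc_score_internal_py (pvRaiseWitness_calc_score_internal_py.1) (pvRaiseWitness_calc_score_internal_py.2) ∧ Raises_calc_score_internal_py (pvRaiseWitness_calc_score_internal_py.1) (pvRaiseWitness_calc_score_internal_py.2) ∧ calc_score_internal_py_alt (pvRaiseWitness_calc_score_internal_py.1) (pvRaiseWitness_calc_score_internal_py.2) = pvRaiseWitnessOut_calc_score_internal_py)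

-- ===== LEMMAS AND PROOFS =====

def pvSorted (dice : List Int) : List Int := PySem.List.sorted dice (fun x => x) false

def pvMaskN (dice : List Int) : Nat :=
  dice.foldl (fun (m : Nat) v => if 1 ≤ v ∧ v ≤ 6 then m ||| (1 <<< (Int.toNat (v - 1))) else m) 0

lemma pv_nodup_singleton (l : List Int) (v : Int) (hne : l ≠ []) (hnd : l.Nodup)
    (hmem : ∀ x ∈ l, x = v) : l = [v] := by
  cases l with
  | nil => exact absurd rfl hne
  | cons x t =>
    have hx : x = v := hmem x (by simp)
    have ht : t = [] := by
      cases t with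
      | nil => rfl
      | cons y u =>
        have hy : y = v := hmem y (by simp)
        simp [hx, hy] at hnd
    simp [hx, ht]

lemma pv_mask_testbit (l : List Int) (m : Nat) (b : Nat) :
    ((l.foldl (fun (m : Nat) v => if 1 ≤ v ∧ v ≤ 6 then m ||| (1 <<< (Int.toNat (v - 1))) else m) m).testBit b)
    = (m.testBit b || decide (b ≤ 5 ∧ ((b : Int) + 1) ∈ l)) := by
  induction l generalizing m with
  | nil => simp
  | cons v t ih =>
    simp only [List.foldl_cons]
    by_cases hv : 1 ≤ v ∧ v ≤ 6
    · rw [if_pos hv, ih]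
      rw [Nat.testBit_or, Nat.testBit_shiftLeft]
      by_cases hb : (b : Int) + 1 = v
      · have h1 : Int.toNat (v - 1) = b := by omega
        have hb5 : b ≤ 5 := by omega
        simp [h1, hb, hb5]
      · have hbit : (decide (b ≥ Int.toNat (v - 1)) && Nat.testBit 1 (b - Int.toNat (v - 1))) = false := by
          by_cases h : Int.toNat (v - 1) ≤ b
          · have h2 : b - Int.toNat (v - 1) ≠ 0 := by omega
            have : Nat.testBit 1 (b - Int.toNat (v - 1)) = false := by
              apply Nat.testBit_eq_false_of_lt
              calc 1 < 2 ^ 1 := by norm_num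
                _ ≤ 2 ^ (b - Int.toNat (v - 1)) := Nat.pow_le_pow_right (by norm_num) (by omega)
            simp only [ge_iff_le, Bool.and_eq_false_iff]
            exact Or.inr this
          · simp only [ge_iff_le, Bool.and_eq_false_iff, decide_eq_false_iff_not]
            exact Or.inl h
        rw [hbit]
        simp only [Bool.or_false]
        congr 1
        simp only [List.mem_cons, decide_eq_decide]
        constructor
        · rintro ⟨h5, h⟩; exact ⟨h5, Or.inr h⟩
        · rintro ⟨h5, h | h⟩
          · exact absurd h hb
          · exact ⟨h5, h⟩
    · rw [if_neg hv, ih]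
      congr 1
      simp only [List.mem_cons, decide_eq_decide]
      constructor
      · rintro ⟨h5, h⟩; exact ⟨h5, Or.inr h⟩
      · rintro ⟨h5, h | h⟩
        · exfalso; omega
        · exact ⟨h5, h⟩

lemma pv_mask_int (l : List Int) :
    (l.foldl (fun m v => if 1 ≤ v ∧ v ≤ 6 then PySem.Int.bor m ((1 : Int) <<< (Int.toNat (v - 1))) else m) 0)
    = ((l.foldl (fun (m : Nat) v => if 1 ≤ v ∧ v ≤ 6 then m ||| (1 <<< (Int.toNat (v - 1))) else m) 0 : Nat) : Int) := by
  suffices h : ∀ (m : Nat), (l.foldl (fun m v => if 1 ≤ v ∧ v ≤ 6 then PySem.Int.bor m ((1 : Int) <<< (Int.toNat (v - 1))) else m) (m : Int))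
      = ((l.foldl (fun (m : Nat) v => if 1 ≤ v ∧ v ≤ 6 then m ||| (1 <<< (Int.toNat (v - 1))) else m) m : Nat) : Int) by
    simpa using h 0
  induction l with
  | nil => simp
  | cons v t ih =>
    intro m
    simp only [List.foldl_cons]
    by_cases hv : 1 ≤ v ∧ v ≤ 6
    · rw [if_pos hv, if_pos hv]
      have : PySem.Int.bor (m : Int) ((1 : Int) <<< (Int.toNat (v - 1)))
          = ((m ||| (1 <<< (Int.toNat (v - 1))) : Nat) : Int) := by
        rw [show ((1 : Int) <<< (Int.toNat (v - 1))) = (((1 <<< (Int.toNat (v - 1)) : Nat)) : Int) from rfl]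
        exact PySem.Int.bor_natCast m _
      rw [this, ih]
    · rw [if_neg hv, if_neg hv, ih]

lemma pv_maskbit (dice : List Int) (b : Nat) :
    (pvMaskN dice).testBit b = decide (b ≤ 5 ∧ ((b : Int) + 1) ∈ dice) := by
  simpa [pvMaskN] using pv_mask_testbit dice 0 b

lemma pv_and_mask (x n : Nat) : (x &&& (2 ^ n - 1) = 2 ^ n - 1) ↔ ∀ j < n, x.testBit j = true := by
  constructor
  · intro h j hj
    have h2 := congrArg (fun y => y.testBit j) h
    simp only [Nat.testBit_and, Nat.testBit_two_pow_sub_one, hj, decide_true, Bool.and_true] at h2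
    exact h2
  · intro h
    apply Nat.eq_of_testBit_eq
    intro i
    rw [Nat.testBit_and, Nat.testBit_two_pow_sub_one]
    by_cases hi : i < n
    · simp [hi, h i hi]
    · simp [hi]

lemma pv_band_window (dice : List Int) (j : Nat) (hj : j ≤ 2) :
    ((pvMaskN dice >>> j) &&& 15 = 15)
      ↔ (((j:Int)+1) ∈ dice ∧ ((j:Int)+2) ∈ dice ∧ ((j:Int)+3) ∈ dice ∧ ((j:Int)+4) ∈ dice) := by
  rw [show (15:Nat) = 2^4-1 by norm_num, pv_and_mask]
  constructor
  · intro h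
    have h0 := h 0 (by norm_num); have h1 := h 1 (by norm_num)
    have h2 := h 2 (by norm_num); have h3 := h 3 (by norm_num)
    rw [Nat.testBit_shiftRight, pv_maskbit] at h0 h1 h2 h3
    simp only [decide_eq_true_eq] at h0 h1 h2 h3
    refine ⟨?_, ?_, ?_, ?_⟩
    · exact (show (((j + 0 : Nat) : Int) + 1) = (j : Int) + 1 by omega) ▸ h0.2
    · exact (show (((j + 1 : Nat) : Int) + 1) = (j : Int) + 2 by omega) ▸ h1.2
    · exact (show (((j + 2 : Nat) : Int) + 1) = (j : Int) + 3 by omega) ▸ h2.2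
    · exact (show (((j + 3 : Nat) : Int) + 1) = (j : Int) + 4 by omega) ▸ h3.2
  · rintro ⟨m1, m2, m3, m4⟩ i hi
    rw [Nat.testBit_shiftRight, pv_maskbit]
    have hmem : ((j + i : Nat) : Int) + 1 ∈ dice := by
      interval_cases i
      · rw [show (((j + 0 : Nat) : Int) + 1) = (j : Int) + 1 by omega]; exact m1
      · rw [show (((j + 1 : Nat) : Int) + 1) = (j : Int) + 2 by omega]; exact m2
      · rw [show (((j + 2 : Nat) : Int) + 1) = (j : Int) + 3 by omega]; exact m3
      · rw [show (((j + 3 : Nat) : Int) + 1) = (j : Int) + 4 by omega]; exact m4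
    simp only [decide_eq_true_eq]
    exact ⟨by omega, hmem⟩

lemma pv_band_large (dice : List Int) (j : Nat) (hj : j ≤ 1) :
    ((pvMaskN dice >>> j) &&& 31 = 31)
      ↔ (((j:Int)+1) ∈ dice ∧ ((j:Int)+2) ∈ dice ∧ ((j:Int)+3) ∈ dice ∧ ((j:Int)+4) ∈ dice ∧ ((j:Int)+5) ∈ dice) := by
  rw [show (31:Nat) = 2^5-1 by norm_num, pv_and_mask]
  constructor
  · intro h
    have h0 := h 0 (by norm_num); have h1 := h 1 (by norm_num)
    have h2 := h 2 (by norm_num); have h3 := h 3 (by norm_num)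
    have h4 := h 4 (by norm_num)
    rw [Nat.testBit_shiftRight, pv_maskbit] at h0 h1 h2 h3 h4
    simp only [decide_eq_true_eq] at h0 h1 h2 h3 h4
    refine ⟨?_, ?_, ?_, ?_, ?_⟩
    · exact (show (((j + 0 : Nat) : Int) + 1) = (j : Int) + 1 by omega) ▸ h0.2
    · exact (show (((j + 1 : Nat) : Int) + 1) = (j : Int) + 2 by omega) ▸ h1.2
    · exact (show (((j + 2 : Nat) : Int) + 1) = (j : Int) + 3 by omega) ▸ h2.2
    · exact (show (((j + 3 : Nat) : Int) + 1) = (j : Int) + 4 by omega) ▸ h3.2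
    · exact (show (((j + 4 : Nat) : Int) + 1) = (j : Int) + 5 by omega) ▸ h4.2
  · rintro ⟨m1, m2, m3, m4, m5⟩ i hi
    rw [Nat.testBit_shiftRight, pv_maskbit]
    have hmem : ((j + i : Nat) : Int) + 1 ∈ dice := by
      interval_cases i
      · rw [show (((j + 0 : Nat) : Int) + 1) = (j : Int) + 1 by omega]; exact m1
      · rw [show (((j + 1 : Nat) : Int) + 1) = (j : Int) + 2 by omega]; exact m2
      · rw [show (((j + 2 : Nat) : Int) + 1) = (j : Int) + 3 by omega]; exact m3
      · rw [show (((j + 3 : Nat) : Int) + 1) = (j : Int) + 4 by omega]; exact m4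
      · rw [show (((j + 4 : Nat) : Int) + 1) = (j : Int) + 5 by omega]; exact m5
    simp only [decide_eq_true_eq]
    exact ⟨by omega, hmem⟩

lemma pv_beq_natCast (a b : Nat) : ((a : Int) == (b : Int)) = (decide (a = b)) := by
  by_cases h : a = b
  · simp [h]
  · simp [h]

lemma pv_size_counter (dice : List Int) :
    (PySem.Dict.counter dice).size = (PySem.Set.ofList dice).length := by
  show (PySem.Dict.counter dice).items.length = _
  rw [PySem.Dict.items_counter]
  simp

lemma pv_values_counter (dice : List Int) :
    (PySem.Dict.counter dice).values = (PySem.Set.ofList dice).map (fun k => ((dice.count k : Nat) : Int)) := by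
  show (PySem.Dict.counter dice).items.map (·.2) = _
  rw [PySem.Dict.items_counter]
  simp [List.map_map]

lemma pv_mem_sorted_iff (dice : List Int) (x : Int) : x ∈ pvSorted dice ↔ x ∈ dice :=
  PySem.List.mem_sorted dice (fun x => x) false x

lemma pv_le_getLast (dice : List Int) (x : Int) (hx : x ∈ pvSorted dice) (h : pvSorted dice ≠ []) :
    x ≤ (pvSorted dice).getLast h := by
  simp only [pvSorted] at hx h ⊢
  obtain ⟨i, hi, hxi⟩ := List.mem_iff_getElem.mp hx
  rw [List.getLast_eq_getElem]
  subst hxi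
  exact PySem.List.sorted_id_getElem_mono dice (by omega) (by omega)

lemma pv_yacht_eq (dice : List Int) :
    (if (PySem.Dict.counter dice).size = 1 then (50:Int) else 0)
    = (match (pvSorted dice).head?, (pvSorted dice).getLast? with
       | some a, some b => if a = b then 50 else 0
       | _, _ => 0) := by
  by_cases hnil : dice = []
  · subst hnil
    decide
  · have hsne : pvSorted dice ≠ [] := by
      simpa [pvSorted, PySem.List.sorted_eq_nil_iff] using hnil
    obtain ⟨a, t, hs⟩ := List.exists_cons_of_ne_nil hsne
    have hhead : (pvSorted dice).head? = some a := by rw [hs]; rfl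
    have hlast : (pvSorted dice).getLast? = some ((pvSorted dice).getLast hsne) := by
      rw [List.getLast?_eq_some_getLast]
    rw [pv_size_counter, hhead, hlast]
    have hiff : (PySem.Set.ofList dice).length = 1 ↔ a = (pvSorted dice).getLast hsne := by
      constructor
      · intro h1
        obtain ⟨v, hv⟩ : ∃ v, PySem.Set.ofList dice = [v] := by
          cases hol : PySem.Set.ofList dice with
          | nil => rw [hol] at h1; simp at h1
          | cons v u =>
            rw [hol] at h1
            simp at h1
            exact ⟨v, by rw [h1]⟩
        have hall : ∀ x ∈ dice, x = v := by
          intro x hx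
          have := (PySem.Set.mem_ofList dice x).mpr hx
          rw [hv] at this
          simpa using this
        have ha : a = v := hall a ((pv_mem_sorted_iff dice a).mp (hs ▸ List.mem_cons_self))
        have hl : (pvSorted dice).getLast hsne = v :=
          hall _ ((pv_mem_sorted_iff dice _).mp (List.getLast_mem hsne))
        rw [ha, hl]
      · intro heq
        have hall : ∀ x ∈ dice, x = a := by
          intro x hx
          have hx' : x ∈ pvSorted dice := (pv_mem_sorted_iff dice x).mpr hx
          have h1 : a ≤ x := PySem.List.key_head_sorted_le dice (fun x => x) hs x hx
          have h2 : x ≤ (pvSorted dice).getLast hsne := pv_le_getLast dice x hx' hsne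
          omega
        have : PySem.Set.ofList dice = [a] := by
          apply pv_nodup_singleton _ _ _ (PySem.Set.nodup_ofList dice)
          · intro x hx
            exact hall x ((PySem.Set.mem_ofList dice x).mp hx)
          · intro hc
            have := (PySem.Set.mem_ofList dice a).mpr
              ((pv_mem_sorted_iff dice a).mp (hs ▸ List.mem_cons_self))
            rw [hc] at this
            simp at this
        rw [this]
        rfl
    by_cases h1 : (PySem.Set.ofList dice).length = 1
    · rw [if_pos h1]
      have := hiff.mp h1
      simp [this]
    · rw [if_neg h1]
      have : ¬ a = (pvSorted dice).getLast hsne := fun h => h1 (hiff.mpr h)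
      simp [this]

lemma pv_window_iff (dice : List Int) :
    (((pvSorted dice).zip ((pvSorted dice).drop 3)).any (fun p => p.1 == p.2) = true)
      ↔ ∃ v, 4 ≤ (pvSorted dice).count v := by
  constructor
  · intro h
    obtain ⟨p, hp, hpe⟩ := List.any_eq_true.mp h
    obtain ⟨i, hi, hpi⟩ := List.mem_iff_getElem.mp hp
    have hlen : i + 4 ≤ (pvSorted dice).length := by
      simp only [List.length_zip, List.length_drop] at hi
      omega
    have hzip : p = ((pvSorted dice)[i]'(by omega), (pvSorted dice)[i + 3]'(by omega)) := by
      rw [← hpi, List.getElem_zip]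
      congr 1
      rw [List.getElem_drop]
      congr 1
      omega
    have heq : (pvSorted dice)[i]'(by omega) = (pvSorted dice)[i + 3]'(by omega) := by
      rw [hzip] at hpe
      simpa using hpe
    refine ⟨(pvSorted dice)[i]'(by omega), ?_⟩
    have hsub : (((pvSorted dice).drop i).take 4).Sublist (pvSorted dice) :=
      (List.take_sublist _ _).trans (List.drop_sublist _ _)
    have hwlen : (((pvSorted dice).drop i).take 4).length = 4 := by
      simp only [List.length_take, List.length_drop]
      omega
    have hall : ∀ b ∈ ((pvSorted dice).drop i).take 4, (pvSorted dice)[i]'(by omega) = b := by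
      intro b hb
      obtain ⟨j, hj, hbj⟩ := List.mem_iff_getElem.mp hb
      rw [hwlen] at hj
      have hbj' : b = (pvSorted dice)[i + j]'(by omega) := by
        rw [← hbj]
        rw [List.getElem_take, List.getElem_drop]
      have h1 : (pvSorted dice)[i]'(by omega) ≤ (pvSorted dice)[i + j]'(by omega) := by
        simp only [pvSorted]
        exact PySem.List.sorted_id_getElem_mono dice (by omega) (by simpa [pvSorted] using hlen.trans_lt' (by omega))
      have h2 : (pvSorted dice)[i + j]'(by omega) ≤ (pvSorted dice)[i + 3]'(by omega) := by
        simp only [pvSorted]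
        exact PySem.List.sorted_id_getElem_mono dice (by omega) (by simpa [pvSorted] using (by omega : i + 3 < (pvSorted dice).length))
      rw [hbj']
      omega
    have hcount : (((pvSorted dice).drop i).take 4).count ((pvSorted dice)[i]'(by omega)) = 4 := by
      rw [List.count_eq_length.mpr hall, hwlen]
    calc (4:Nat) = _ := hcount.symm
      _ ≤ _ := hsub.count_le _
  · rintro ⟨v, hv⟩
    have hsub : (List.replicate 4 v).Sublist (pvSorted dice) := List.replicate_sublist_iff.mpr hv
    obtain ⟨is, his, hpw⟩ := List.sublist_eq_map_getElem hsub
    have hlen4 : is.length = 4 := by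
      have := congrArg List.length his
      simpa using this.symm
    rcases is with _|⟨i0,_|⟨i1,_|⟨i2,_|⟨i3,_|⟨i4,rest⟩⟩⟩⟩⟩ <;> simp at hlen4
    rw [show List.replicate 4 v = [v,v,v,v] from rfl] at his
    simp only [List.map_cons, List.map_nil, List.cons.injEq, and_true] at his
    obtain ⟨h0, h1, h2, h3⟩ := his
    simp only [List.pairwise_cons, List.mem_cons, List.not_mem_nil, or_false] at hpw
    have hlt : (i0:Nat) < i1 ∧ (i1:Nat) < i2 ∧ (i2:Nat) < i3 := by
      refine ⟨?_, ?_, ?_⟩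
      · exact hpw.1 i1 (by tauto)
      · exact hpw.2.1 i2 (by tauto)
      · exact hpw.2.2.1 i3 (by tauto)
    have hi3 : (i3:Nat) < (pvSorted dice).length := i3.isLt
    have hle : (i0:Nat) + 3 ≤ i3 := by omega
    apply List.any_eq_true.mpr
    have hzl : (i0:Nat) < (((pvSorted dice)).zip ((pvSorted dice).drop 3)).length := by
      simp only [List.length_zip, List.length_drop]
      omega
    refine ⟨_, List.getElem_mem hzl, ?_⟩
    rw [List.getElem_zip]
    have hd : ((pvSorted dice).drop 3)[(i0:Nat)]'(by simp only [List.length_drop]; omega)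
        = (pvSorted dice)[(i0:Nat) + 3]'(by omega) := by
      rw [List.getElem_drop]
      congr 1
      omega
    simp only [hd]
    have ha : (pvSorted dice)[(i0:Nat)]'(by omega) ≤ (pvSorted dice)[(i0:Nat) + 3]'(by omega) := by
      simp only [pvSorted]
      exact PySem.List.sorted_id_getElem_mono dice (by omega)
        (by simpa [pvSorted] using (by omega : (i0:Nat) + 3 < (pvSorted dice).length))
    have hb : (pvSorted dice)[(i0:Nat) + 3]'(by omega) ≤ (pvSorted dice)[(i3:Nat)]'(by omega) := by
      simp only [pvSorted]
      exact PySem.List.sorted_id_getElem_mono dice (by omega) (by simpa [pvSorted] using i3.isLt)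
    have hv0 : (pvSorted dice)[(i0:Nat)]'(by omega) = v := by
      rw [h0]; rfl
    have hv3 : (pvSorted dice)[(i3:Nat)]'(by omega) = v := by
      rw [h3]; rfl
    have heq2 : (pvSorted dice)[(i0:Nat)]'(by omega) = (pvSorted dice)[(i0:Nat) + 3]'(by omega) := by
      omega
    simp [heq2]

lemma pv_count_sorted (dice : List Int) (v : Int) : (pvSorted dice).count v = dice.count v :=
  (PySem.List.sorted_perm dice (fun x => x) false).count_eq v

lemma pv_fourkind_eq (dice : List Int) (h : dice ≠ []) :
    (match (PySem.List.sorted (PySem.Dict.counter dice).items (fun p => p.2) true).head? with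
     | some mc => if 4 ≤ mc.2 then dice.sum else 0
     | none => 0)
    = (if ((pvSorted dice).zip (PySem.List.slice (pvSorted dice) (some 3) none)).any
          (fun p => p.1 == p.2) then dice.sum else 0) := by
  rw [show PySem.List.slice (pvSorted dice) (some 3) none = (pvSorted dice).drop 3 from by simp [pysem]]
  have hine : (PySem.Dict.counter dice).items ≠ [] := by
    rw [PySem.Dict.items_counter]
    simp only [ne_eq, List.map_eq_nil_iff]
    intro hc
    obtain ⟨x, hx⟩ := List.exists_mem_of_ne_nil dice h
    have := (PySem.Set.mem_ofList dice x).mpr hx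
    rw [hc] at this
    simp at this
  obtain ⟨mc, t, hs⟩ := List.exists_cons_of_ne_nil
    (fun hc => hine ((PySem.List.sorted_eq_nil_iff _ _ _).mp hc) :
      PySem.List.sorted (PySem.Dict.counter dice).items (fun p => p.2) true ≠ [])
  rw [hs]
  show (if 4 ≤ mc.2 then dice.sum else 0) = _
  have hmax : ∀ y ∈ (PySem.Dict.counter dice).items, y.2 ≤ mc.2 :=
    PySem.List.key_head_sorted_rev_ge _ _ hs
  have hmc : mc ∈ (PySem.Dict.counter dice).items := by
    have := (PySem.List.mem_sorted (PySem.Dict.counter dice).items (fun p => p.2) true mc).mp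
      (hs ▸ List.mem_cons_self)
    exact this
  rw [PySem.Dict.items_counter] at hmc hmax
  obtain ⟨k, hk, hkmc⟩ := List.mem_map.mp hmc
  have hiff : (4 ≤ mc.2) ↔ (∃ v, 4 ≤ (pvSorted dice).count v) := by
    constructor
    · intro h4
      refine ⟨k, ?_⟩
      rw [pv_count_sorted]
      have : mc.2 = ((dice.count k : Nat) : Int) := by rw [← hkmc]
      rw [this] at h4
      exact_mod_cast h4
    · rintro ⟨v, hv⟩
      rw [pv_count_sorted] at hv
      have hvd : v ∈ dice := by
        have : 0 < dice.count v := by omega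
        exact List.count_pos_iff.mp this
      have hmem : (v, ((dice.count v : Nat) : Int)) ∈
          (PySem.Set.ofList dice).map (fun k => (k, ((dice.count k : Nat) : Int))) :=
        List.mem_map.mpr ⟨v, (PySem.Set.mem_ofList dice v).mpr hvd, rfl⟩
      have := hmax _ hmem
      simp only at this
      have h4 : (4:Int) ≤ ((dice.count v : Nat) : Int) := by exact_mod_cast hv
      omega
  by_cases h4 : 4 ≤ mc.2
  · rw [if_pos h4, if_pos (pv_window_iff dice |>.mpr (hiff.mp h4))]
  · rw [if_neg h4]
    rw [if_neg (fun hw => h4 (hiff.mpr ((pv_window_iff dice).mp hw)))]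

lemma pv_ite_or {p q : Prop} [Decidable p] [Decidable q] (x : Int) :
    (if p then x else if q then x else 0) = (if p ∨ q then x else 0) := by
  by_cases hp : p <;> by_cases hq : q <;> simp [hp, hq]

lemma pv_len_two (l : List Int) (x y : Int) (hxy : x ≠ y) (h : ∀ d ∈ l, d = x ∨ d = y) :
    l.length = l.count x + l.count y := by
  induction l with
  | nil => simp
  | cons d t ih =>
    have hd := h d (by simp)
    have ht := ih (fun e he => h e (by simp [he]))
    rcases hd with h1 | h1 <;> subst h1 <;>
      simp [ht, hxy, Ne.symm hxy] <;> omega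

lemma pv_nodup_two (l : List Int) (x y : Int) (hxy : x ≠ y) (hnd : l.Nodup)
    (hiff : ∀ z, z ∈ l ↔ (z = x ∨ z = y)) : l.length = 2 := by
  have hcard := List.toFinset_card_of_nodup hnd
  have hset : l.toFinset = {x, y} := by
    ext z
    simp [hiff]
  rw [hset] at hcard
  rw [← hcard, Finset.card_pair hxy]

lemma pv_perm_two (l : List Int) (x y : Int) (hxy : x ≠ y) (hmem : ∀ d ∈ l, d = x ∨ d = y) :
    l.Perm (List.replicate (l.count x) x ++ List.replicate (l.count y) y) := by
  rw [List.perm_iff_count]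
  intro v
  rw [List.count_append, List.count_replicate, List.count_replicate]
  simp only [beq_iff_eq]
  by_cases hvx : v = x
  · subst hvx
    rw [if_pos rfl, if_neg (fun h : y = v => hxy h.symm)]
    omega
  · by_cases hvy : v = y
    · subst hvy
      rw [if_pos rfl, if_neg (fun h : x = v => hxy h)]
      omega
    · have : l.count v = 0 := by
        rw [List.count_eq_zero]
        intro hv
        rcases hmem v hv with h | h <;> [exact hvx h; exact hvy h]
      rw [this, if_neg (fun h : x = v => hvx h.symm), if_neg (fun h : y = v => hvy h.symm)]

lemma pv_sorted_canon (dice : List Int) (x y : Int) (hxy : x < y)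
    (hmem : ∀ d ∈ dice, d = x ∨ d = y) :
    pvSorted dice = List.replicate (dice.count x) x ++ List.replicate (dice.count y) y := by
  apply PySem.List.sorted_id_eq_of_perm_of_pairwise
  · exact (pv_perm_two dice x y (by omega) hmem).symm
  · rw [List.pairwise_append]
    refine ⟨List.pairwise_replicate.mpr (by simp), List.pairwise_replicate.mpr (by simp), ?_⟩
    intro a ha b hb
    rw [List.eq_of_mem_replicate ha, List.eq_of_mem_replicate hb]
    omega

lemma pv_sorted_const (dice : List Int) (v : Int) (hall : ∀ d ∈ dice, d = v) :
    pvSorted dice = List.replicate dice.length v := by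
  have hrep : dice = List.replicate dice.length v := List.eq_replicate_iff.mpr ⟨rfl, hall⟩
  apply PySem.List.sorted_id_eq_of_perm_of_pairwise
  · exact (hrep ▸ List.Perm.refl dice)
  · exact List.pairwise_replicate.mpr (by simp)

lemma pv_A1_struct (dice : List Int)
    (h2 : (PySem.Set.ofList dice).length = 2)
    (h3v : (3:Int) ∈ (PySem.Set.ofList dice).map (fun k => ((dice.count k : Nat) : Int)))
    (h2v : (2:Int) ∈ (PySem.Set.ofList dice).map (fun k => ((dice.count k : Nat) : Int))) :
    ∃ x y, x ≠ y ∧ dice.count x = 3 ∧ dice.count y = 2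
      ∧ (∀ d ∈ dice, d = x ∨ d = y) ∧ dice.length = 5 := by
  rcases hK : PySem.Set.ofList dice with _ | ⟨x, _ | ⟨y, _ | ⟨z, r⟩⟩⟩
  · rw [hK] at h2; simp at h2
  · rw [hK] at h2; simp at h2
  swap
  · rw [hK] at h2; simp only [List.length_cons] at h2; omega
  have hnd := PySem.Set.nodup_ofList dice
  rw [hK] at hnd
  have hxy : x ≠ y := by
    simp only [List.nodup_cons, List.mem_singleton, List.not_mem_nil, not_false_iff] at hnd
    exact hnd.1
  have hmem : ∀ d ∈ dice, d = x ∨ d = y := by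
    intro d hd
    have := (PySem.Set.mem_ofList dice d).mpr hd
    rw [hK] at this
    simpa using this
  rw [hK] at h3v h2v
  simp only [List.map_cons, List.map_nil, List.mem_cons, List.not_mem_nil, or_false] at h3v h2v
  have h3v' : dice.count x = 3 ∨ dice.count y = 3 := by
    rcases h3v with h | h
    · left; exact_mod_cast h.symm
    · right; exact_mod_cast h.symm
  have h2v' : dice.count x = 2 ∨ dice.count y = 2 := by
    rcases h2v with h | h
    · left; exact_mod_cast h.symm
    · right; exact_mod_cast h.symm
  have hltot := pv_len_two dice x y hxy hmem
  rcases h3v' with h3x | h3y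
  · have h2y : dice.count y = 2 := by
      rcases h2v' with h | h
      · omega
      · exact h
    exact ⟨x, y, hxy, h3x, h2y, hmem, by omega⟩
  · have h2x : dice.count x = 2 := by
      rcases h2v' with h | h
      · exact h
      · omega
    exact ⟨y, x, Ne.symm hxy, h3y, h2x, fun d hd => (hmem d hd).symm, by omega⟩

lemma pv_fh_one (dice : List Int) (v : Int) (hall : ∀ z ∈ dice, z = v) (h5 : dice.length = 5) :
    (PySem.Set.ofList dice).length = 1 ∧ dice.length = 5 := by
  have hne : dice ≠ [] := by
    intro h
    rw [h] at h5
    simp at h5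
  obtain ⟨w, hw⟩ := List.exists_mem_of_ne_nil dice hne
  have hset : PySem.Set.ofList dice = [v] := by
    apply pv_nodup_singleton _ _ _ (PySem.Set.nodup_ofList dice)
    · intro z hz
      exact hall z ((PySem.Set.mem_ofList dice z).mp hz)
    · exact List.ne_nil_of_mem ((PySem.Set.mem_ofList dice w).mpr hw)
  rw [hset]
  exact ⟨rfl, h5⟩

lemma pv_fh_two (dice : List Int) (x y : Int) (hxy : x ≠ y)
    (h3 : dice.count x = 3) (h2 : dice.count y = 2)
    (hmem : ∀ z ∈ dice, z = x ∨ z = y) :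
    (PySem.Set.ofList dice).length = 2
    ∧ (3:Int) ∈ (PySem.Set.ofList dice).map (fun k => ((dice.count k : Nat) : Int))
    ∧ (2:Int) ∈ (PySem.Set.ofList dice).map (fun k => ((dice.count k : Nat) : Int)) := by
  have hxd : x ∈ dice := List.count_pos_iff.mp (by omega)
  have hyd : y ∈ dice := List.count_pos_iff.mp (by omega)
  refine ⟨pv_nodup_two _ x y hxy (PySem.Set.nodup_ofList dice) (fun z => by
      rw [PySem.Set.mem_ofList]
      constructor
      · exact hmem z
      · rintro (h | h) <;> subst h <;> assumption), ?_, ?_⟩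
  · exact List.mem_map.mpr ⟨x, (PySem.Set.mem_ofList dice x).mpr hxd, by rw [h3]; rfl⟩
  · exact List.mem_map.mpr ⟨y, (PySem.Set.mem_ofList dice y).mpr hyd, by rw [h2]; rfl⟩

lemma pv_fullhouse_eq (dice : List Int) :
    (if (PySem.Dict.counter dice).size = 2 ∧ (3 : Int) ∈ (PySem.Dict.counter dice).values
        ∧ (2 : Int) ∈ (PySem.Dict.counter dice).values then dice.sum
     else if (PySem.Dict.counter dice).size = 1 ∧ dice.length = 5 then dice.sum
     else 0)
    = (match pvSorted dice with
       | [a, b, c, d, e] => if a = b ∧ d = e ∧ (b = c ∨ c = d) then dice.sum else 0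
       | _ => 0) := by
  rw [pv_ite_or]
  simp only [pv_size_counter, pv_values_counter]
  have hlen : (pvSorted dice).length = dice.length :=
    PySem.List.length_sorted dice (fun x => x) false
  by_cases hPA : ((PySem.Set.ofList dice).length = 2
        ∧ (3:Int) ∈ (PySem.Set.ofList dice).map (fun k => ((dice.count k : Nat) : Int))
        ∧ (2:Int) ∈ (PySem.Set.ofList dice).map (fun k => ((dice.count k : Nat) : Int)))
      ∨ ((PySem.Set.ofList dice).length = 1 ∧ dice.length = 5)
  · rw [if_pos hPA]
    rcases hPA with ⟨h2, h3v, h2v⟩ | ⟨h1, h5⟩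
    · obtain ⟨x, y, hxy, h3, h2c, hmem, h5len⟩ := pv_A1_struct dice h2 h3v h2v
      rcases lt_or_gt_of_ne hxy with hlt | hgt
      · have hs := pv_sorted_canon dice x y hlt hmem
        rw [h3, h2c] at hs
        rw [show List.replicate 3 x ++ List.replicate 2 y = [x, x, x, y, y] from rfl] at hs
        rw [hs]
        simp
      · have hs := pv_sorted_canon dice y x hgt (fun d hd => (hmem d hd).symm)
        rw [h3, h2c] at hs
        rw [show List.replicate 2 y ++ List.replicate 3 x = [y, y, x, x, x] from rfl] at hs
        rw [hs]
        simp
    · rcases hK : PySem.Set.ofList dice with _ | ⟨v, _ | ⟨w, r⟩⟩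
      · rw [hK] at h1; simp at h1
      swap
      · rw [hK] at h1; simp only [List.length_cons] at h1; omega
      have hall : ∀ d ∈ dice, d = v := by
        intro d hd
        have := (PySem.Set.mem_ofList dice d).mpr hd
        rw [hK] at this
        simpa using this
      have hs := pv_sorted_const dice v hall
      rw [h5] at hs
      rw [show List.replicate 5 v = [v, v, v, v, v] from rfl] at hs
      rw [hs]
      simp
  · rw [if_neg hPA]
    rcases hs : pvSorted dice with _ | ⟨a, _ | ⟨b, _ | ⟨c, _ | ⟨d, _ | ⟨e, _ | ⟨f, rest⟩⟩⟩⟩⟩⟩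
    · rfl
    · rfl
    · rfl
    · rfl
    · rfl
    · -- exactly five elements
      have hperm : [a, b, c, d, e].Perm dice := by
        have := PySem.List.sorted_perm dice (fun x => x) false
        rw [show PySem.List.sorted dice (fun x => x) false = pvSorted dice from rfl, hs] at this
        exact this
      have hlen5 : dice.length = 5 := by
        rw [hs] at hlen
        simpa using hlen.symm
      show 0 = if a = b ∧ d = e ∧ (b = c ∨ c = d) then dice.sum else 0
      rw [if_neg]
      rintro ⟨hab, hde, hbc_or⟩
      have hperm' := hperm.symm  -- dice.Perm [a,b,c,d,e]
      rcases hbc_or with hbc | hcd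
      · have hL : ([a, b, c, d, e] : List Int) = [a, a, a, d, d] := by
          rw [show b = a from hab.symm, show c = a from (hab.trans hbc).symm,
              show e = d from hde.symm]
        rw [hL] at hperm
        have hmemd : ∀ z ∈ dice, z = a ∨ z = d := by
          intro z hz
          have hz5 := hperm.mem_iff.mpr hz
          rcases (by simpa using hz5 : z = a ∨ z = a ∨ z = a ∨ z = d ∨ z = d) with h|h|h|h|h
            <;> [exact Or.inl h; exact Or.inl h; exact Or.inl h; exact Or.inr h; exact Or.inr h]
        by_cases had : a = d
        · exact hPA (Or.inr (pv_fh_one dice a (fun z hz =>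
            (hmemd z hz).elim id (fun h => h.trans had.symm)) hlen5))
        · have hc3 : dice.count a = 3 := by
            rw [← hperm.count_eq]
            simp [Ne.symm had]
          have hc2 : dice.count d = 2 := by
            rw [← hperm.count_eq]
            simp [had]
          exact hPA (Or.inl (pv_fh_two dice a d had hc3 hc2 hmemd))
      · have hL : ([a, b, c, d, e] : List Int) = [a, a, d, d, d] := by
          rw [show b = a from hab.symm, show c = d from hcd,
              show e = d from hde.symm]
        rw [hL] at hperm
        have hmemd : ∀ z ∈ dice, z = a ∨ z = d := by
          intro z hz
          have hz5 := hperm.mem_iff.mpr hz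
          rcases (by simpa using hz5 : z = a ∨ z = a ∨ z = d ∨ z = d ∨ z = d) with h|h|h|h|h
            <;> [exact Or.inl h; exact Or.inl h; exact Or.inr h; exact Or.inr h; exact Or.inr h]
        by_cases had : a = d
        · exact hPA (Or.inr (pv_fh_one dice a (fun z hz =>
            (hmemd z hz).elim id (fun h => h.trans had.symm)) hlen5))
        · have hc3 : dice.count d = 3 := by
            rw [← hperm.count_eq]
            simp [had]
          have hc2 : dice.count a = 2 := by
            rw [← hperm.count_eq]
            simp [Ne.symm had]
          exact hPA (Or.inl (pv_fh_two dice d a (Ne.symm had) hc3 hc2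
            (fun z hz => (hmemd z hz).symm)))
    · rfl

lemma pv_small_eq (dice : List Int) :
    (if [([1,2,3,4] : List Int), [2,3,4,5], [3,4,5,6]].any
        (fun st => PySem.Set.issubset (PySem.Set.ofList st) (PySem.Set.ofList dice)) then (15:Int) else 0)
    = (if (PySem.List.pyRange 0 3 1).any (fun k => PySem.Int.band
          ((dice.foldl (fun m v => if 1 ≤ v ∧ v ≤ 6 then PySem.Int.bor m ((1 : Int) <<< (Int.toNat (v - 1))) else m) 0) >>> Int.toNat k) 15 == 15)
        then 15 else 0) := by
  have hmask : (dice.foldl (fun m v => if 1 ≤ v ∧ v ≤ 6 then PySem.Int.bor m ((1 : Int) <<< (Int.toNat (v - 1))) else m) 0)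
      = ((pvMaskN dice : Nat) : Int) := by
    rw [pv_mask_int]
    rfl
  rw [hmask]
  have hA : ([([1,2,3,4] : List Int), [2,3,4,5], [3,4,5,6]].any
      (fun st => PySem.Set.issubset (PySem.Set.ofList st) (PySem.Set.ofList dice)) = true)
      ↔ (((1:Int) ∈ dice ∧ (2:Int) ∈ dice ∧ (3:Int) ∈ dice ∧ (4:Int) ∈ dice)
        ∨ ((2:Int) ∈ dice ∧ (3:Int) ∈ dice ∧ (4:Int) ∈ dice ∧ (5:Int) ∈ dice)
        ∨ ((3:Int) ∈ dice ∧ (4:Int) ∈ dice ∧ (5:Int) ∈ dice ∧ (6:Int) ∈ dice)) := by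
    simp [PySem.Set.issubset_iff, PySem.Set.mem_ofList,
      show PySem.Set.ofList ([1,2,3,4] : List Int) = [1,2,3,4] from rfl,
      show PySem.Set.ofList ([2,3,4,5] : List Int) = [2,3,4,5] from rfl,
      show PySem.Set.ofList ([3,4,5,6] : List Int) = [3,4,5,6] from rfl]
  have hB : ((PySem.List.pyRange 0 3 1).any (fun k => PySem.Int.band
        (((pvMaskN dice : Nat) : Int) >>> Int.toNat k) 15 == 15) = true)
      ↔ (((1:Int) ∈ dice ∧ (2:Int) ∈ dice ∧ (3:Int) ∈ dice ∧ (4:Int) ∈ dice)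
        ∨ ((2:Int) ∈ dice ∧ (3:Int) ∈ dice ∧ (4:Int) ∈ dice ∧ (5:Int) ∈ dice)
        ∨ ((3:Int) ∈ dice ∧ (4:Int) ∈ dice ∧ (5:Int) ∈ dice ∧ (6:Int) ∈ dice)) := by
    rw [show PySem.List.pyRange 0 3 1 = [0,1,2] from rfl]
    simp only [List.any_cons, List.any_nil, Bool.or_eq_true, Bool.or_false]
    rw [show (15:Int) = ((15:Nat):Int) from rfl]
    rw [show (((pvMaskN dice : Nat) : Int) >>> Int.toNat (0:Int)) = ((pvMaskN dice >>> 0 : Nat) : Int) from rfl]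
    rw [show (((pvMaskN dice : Nat) : Int) >>> Int.toNat (1:Int)) = ((pvMaskN dice >>> 1 : Nat) : Int) from rfl]
    rw [show (((pvMaskN dice : Nat) : Int) >>> Int.toNat (2:Int)) = ((pvMaskN dice >>> 2 : Nat) : Int) from rfl]
    rw [PySem.Int.band_natCast, PySem.Int.band_natCast, PySem.Int.band_natCast]
    rw [pv_beq_natCast, pv_beq_natCast, pv_beq_natCast]
    simp only [decide_eq_true_eq]
    rw [pv_band_window dice 0 (by norm_num), pv_band_window dice 1 (by norm_num),
        pv_band_window dice 2 (by norm_num)]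
    norm_num
  by_cases hP : (((1:Int) ∈ dice ∧ (2:Int) ∈ dice ∧ (3:Int) ∈ dice ∧ (4:Int) ∈ dice)
        ∨ ((2:Int) ∈ dice ∧ (3:Int) ∈ dice ∧ (4:Int) ∈ dice ∧ (5:Int) ∈ dice)
        ∨ ((3:Int) ∈ dice ∧ (4:Int) ∈ dice ∧ (5:Int) ∈ dice ∧ (6:Int) ∈ dice))
  · rw [if_pos (hA.mpr hP), if_pos (hB.mpr hP)]
  · rw [if_neg (fun hh => hP (hA.mp hh)), if_neg (fun hh => hP (hB.mp hh))]

lemma pv_large_eq (dice : List Int) :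
    (if PySem.Set.issubset (PySem.Set.ofList ([1,2,3,4,5] : List Int)) (PySem.Set.ofList dice)
        ∨ PySem.Set.issubset (PySem.Set.ofList ([2,3,4,5,6] : List Int)) (PySem.Set.ofList dice) then (30:Int) else 0)
    = (if PySem.Int.band (dice.foldl (fun m v => if 1 ≤ v ∧ v ≤ 6 then PySem.Int.bor m ((1 : Int) <<< (Int.toNat (v - 1))) else m) 0) 31 = 31
        ∨ PySem.Int.band ((dice.foldl (fun m v => if 1 ≤ v ∧ v ≤ 6 then PySem.Int.bor m ((1 : Int) <<< (Int.toNat (v - 1))) else m) 0) >>> 1) 31 = 31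
        then 30 else 0) := by
  have hmask : (dice.foldl (fun m v => if 1 ≤ v ∧ v ≤ 6 then PySem.Int.bor m ((1 : Int) <<< (Int.toNat (v - 1))) else m) 0)
      = ((pvMaskN dice : Nat) : Int) := by
    rw [pv_mask_int]
    rfl
  rw [hmask]
  have hA : (PySem.Set.issubset (PySem.Set.ofList ([1,2,3,4,5] : List Int)) (PySem.Set.ofList dice)
        ∨ PySem.Set.issubset (PySem.Set.ofList ([2,3,4,5,6] : List Int)) (PySem.Set.ofList dice))
      ↔ (((1:Int) ∈ dice ∧ (2:Int) ∈ dice ∧ (3:Int) ∈ dice ∧ (4:Int) ∈ dice ∧ (5:Int) ∈ dice)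
        ∨ ((2:Int) ∈ dice ∧ (3:Int) ∈ dice ∧ (4:Int) ∈ dice ∧ (5:Int) ∈ dice ∧ (6:Int) ∈ dice)) := by
    simp [PySem.Set.issubset_iff, PySem.Set.mem_ofList,
      show PySem.Set.ofList ([1,2,3,4,5] : List Int) = [1,2,3,4,5] from rfl,
      show PySem.Set.ofList ([2,3,4,5,6] : List Int) = [2,3,4,5,6] from rfl]
  have h0 := pv_band_large dice 0 (by norm_num)
  rw [Nat.shiftRight_zero] at h0
  have h1 := pv_band_large dice 1 (by norm_num)
  have hB : (PySem.Int.band ((pvMaskN dice : Nat) : Int) 31 = 31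
        ∨ PySem.Int.band (((pvMaskN dice : Nat) : Int) >>> (1:Int)) 31 = 31)
      ↔ (((1:Int) ∈ dice ∧ (2:Int) ∈ dice ∧ (3:Int) ∈ dice ∧ (4:Int) ∈ dice ∧ (5:Int) ∈ dice)
        ∨ ((2:Int) ∈ dice ∧ (3:Int) ∈ dice ∧ (4:Int) ∈ dice ∧ (5:Int) ∈ dice ∧ (6:Int) ∈ dice)) := by
    rw [show (31:Int) = ((31:Nat):Int) from rfl]
    rw [show (((pvMaskN dice : Nat) : Int) >>> (1:Int)) = ((pvMaskN dice >>> 1 : Nat) : Int) from rfl]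
    rw [PySem.Int.band_natCast, PySem.Int.band_natCast]
    rw [show ∀ (p q : Nat), ((p:Int) = (q:Int)) = (p = q) from fun p q => by simp]
    rw [show ∀ (p q : Nat), ((p:Int) = (q:Int)) = (p = q) from fun p q => by simp]
    rw [h0, h1]
    norm_num
  simp only [hA, hB]

-- ===== VERDICT (by name: the statement is the Claim_ definition above) =====
theorem calc_score_internal_py_spec : Claim_equal_calc_score_internal_py := by
  intro dice c _ hpre
  unfold Spec_calc_score_internal_py calc_score_internal_py calc_score_internal_py_alt
  by_cases h05 : 0 ≤ c ∧ c ≤ 5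
  · simp [h05, PySem.Dict.getD_counter]
  by_cases h6 : c = 6
  · simp [h6]
  by_cases h7 : c = 7
  · have hne : dice ≠ [] := fun h => hpre ⟨h, h7⟩
    simpa [h05, h6, h7] using pv_fourkind_eq dice hne
  by_cases h8 : c = 8
  · simpa [h05, h6, h7, h8] using pv_fullhouse_eq dice
  by_cases h9 : c = 9
  · simpa [h05, h6, h7, h8, h9] using pv_small_eq dice
  by_cases h10 : c = 10
  · simpa [h05, h6, h7, h8, h9, h10] using pv_large_eq dice
  by_cases h11 : c = 11
  · simpa [h05, h6, h7, h8, h9, h10, h11] using pv_yacht_eq dice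
  · simp [h05, h6, h7, h8, h9, h10, h11]

@[simp] theorem calc_score_internal_py_raises : Claim_raises_calc_score_internal_py := by
  unfold Claim_raises_calc_score_internal_py
  exact ⟨fun dice c _ hr hp => hp hr, by decide⟩
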